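-- pv_equiv track=rewrite | github.com/S-Christensen/cartographersStudy | scoringCards.py | traylomonastery
-- ===== SOURCE A (Python) =====
-- def dfs(grid, row, col, visited, terrain_type):
--     stack = [(row, col)]
--     cluster = []
--
--     while stack:
--         r, c = stack.pop()
--         if (r, c) not in visited and grid[r][c] == terrain_type:
--             visited.add((r, c))
--             cluster.append((r, c))
--             for dr, dc in [(1, 0), (-1, 0), (0, 1), (0, -1)]:
--                 nr, nc = r + dr, c + dc
--                 if 0 <= nr < len(grid) and 0 <= nc < len(grid[0]):
--                     stack.append((nr, nc))
--     return cluster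
--
-- def contains_4x1_or_1x4(cluster):
--     coordinates_set = set(cluster)
--     for r, c in coordinates_set:
--         # Check for 4x1 rectangle
--         if all((r, c + i) in coordinates_set for i in range(4)):
--             return True
--         # Check for 1x4 rectangle
--         if all((r + i, c) in coordinates_set for i in range(4)):
--             return True
--     return False
--
-- def traylomonastery(grid):
--     visited = set()
--     clusters = []
--
--     for row in range(len(grid)):
--         for col in range(len(grid[0])):
--             if (row, col) not in visited and grid[row][col] == "village":
--                 cluster = dfs(grid, row, col, visited, "village")
--                 clusters.append(cluster)
--
--     count = 0
--     for cluster in clusters: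
--         if contains_4x1_or_1x4(cluster):
--             count += 1
--
--     return count*7
-- ===== SOURCE B (Python) =====
-- def traylomonastery(grid):
--     rows = len(grid)
--     cols = len(grid[0]) if grid else 0
--     label = {}  # village coordinate -> component label
--     nxt = 0
--     for r in range(rows):
--         for c in range(cols):
--             if grid[r][c] != "village":
--                 continue
--             left = label.get((r, c - 1))
--             up = label.get((r - 1, c))
--             if left is None and up is None:
--                 label[(r, c)] = nxt
--                 nxt += 1
--             elif left is None:
--                 label[(r, c)] = up
--             elif up is None or up == left:
--                 label[(r, c)] = left
--             else:
--                 label[(r, c)] = left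
--                 for k in list(label):
--                     if label[k] == up:
--                         label[k] = left
--     groups = {}
--     for cell, l in label.items():
--         groups.setdefault(l, []).append(cell)
--     count = 0
--     for cells in groups.values():
--         s = set(cells)
--         if any(all((r, c + i) in s for i in range(4))
--                or all((r + i, c) in s for i in range(4)) for (r, c) in cells):
--             count += 1
--     return count * 7
-- ===== Notes on version B (the rewrite author's own statement) =====
-- stated objective: alternative
-- what changed: A's per-seed explicit-stack DFS flood fill is replaced by a single raster scan doing classic connected-component labeling in a dictionary (a village cell adopts its left/up neighbour's label; two distinct labels are merged by relabeling), then grouping cells by final label.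
import Mathlib
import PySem

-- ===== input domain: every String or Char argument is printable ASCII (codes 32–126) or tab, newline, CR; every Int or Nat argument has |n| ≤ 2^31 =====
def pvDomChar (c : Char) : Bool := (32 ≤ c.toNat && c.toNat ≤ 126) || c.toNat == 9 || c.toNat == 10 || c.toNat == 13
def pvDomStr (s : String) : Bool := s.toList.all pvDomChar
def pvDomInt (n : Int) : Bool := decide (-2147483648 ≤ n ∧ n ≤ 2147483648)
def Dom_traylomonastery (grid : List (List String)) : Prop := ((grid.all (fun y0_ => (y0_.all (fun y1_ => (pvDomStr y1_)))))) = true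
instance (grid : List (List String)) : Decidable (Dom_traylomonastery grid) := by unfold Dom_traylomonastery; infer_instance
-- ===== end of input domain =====

-- B replaces A's per-seed stack DFS by a single raster scan doing connected-component
-- labeling in a dictionary (merge-by-relabel); objective: alternative algorithm/data structure.

-- ===== PORT A =====

-- grid[r][c] (both indexings Python-exact; some _ = value, none = IndexError).
def pvCell2 (grid : List (List String)) (r c : Int) : Option String :=
  (PySem.List.pyGet? grid r).bind (fun row => PySem.List.pyGet? row c)

def pvDirs : List (Int × Int) := [(1, 0), (-1, 0), (0, 1), (0, -1)]

-- A's dfs while-loop.  The Python list used as a stack is modeled with its TOP AT THE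
-- HEAD (append = cons, pop = uncons), so the four pushes of one step are appended
-- reversed and pops arrive exactly in Python's order.  Fuel only makes the loop total;
-- traylomonastery passes provably sufficient fuel (see pvDfsFuel lemmas below).
def pvDfsLoop (grid : List (List String)) (tt : String) :
    Nat → PySem.Set (Int × Int) → List (Int × Int) → List (Int × Int) →
    PySem.Set (Int × Int) × List (Int × Int)
  | 0, v, cl, _ => (v, cl)
  | _ + 1, v, cl, [] => (v, cl)
  | fuel + 1, v, cl, p :: rest =>
      if ¬ PySem.Set.contains v p && (pvCell2 grid p.1 p.2 == some tt) then
        let pushed := (pvDirs.map (fun d => (p.1 + d.1, p.2 + d.2))).filter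
            (fun n => decide (0 ≤ n.1) && decide (n.1 < (grid.length : Int)) &&
                      decide (0 ≤ n.2) && decide (n.2 < (((grid.headD []).length : Nat) : Int)))
        pvDfsLoop grid tt fuel (PySem.Set.add v p) (cl ++ [p]) (pushed.reverse ++ rest)
      else pvDfsLoop grid tt fuel v cl rest

-- A's contains_4x1_or_1x4 (the for/early-return over set(cluster) is an `any`).
def pvContains4 (cluster : List (Int × Int)) : Bool :=
  let s := PySem.Set.ofList cluster
  s.any (fun p =>
    ((PySem.List.pyRange 0 4).all (fun i => PySem.Set.contains s (p.1, p.2 + i))) ||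
    ((PySem.List.pyRange 0 4).all (fun i => PySem.Set.contains s (p.1 + i, p.2))))

-- one step of A's outer raster scan (the body of the nested for-loops)
def pvAStep (g : List (List String)) (st : PySem.Set (Int × Int) × List (List (Int × Int)))
    (q : Int × Int) : PySem.Set (Int × Int) × List (List (Int × Int)) :=
  if ¬ PySem.Set.contains st.1 q && (pvCell2 g q.1 q.2 == some "village") then
    let p := pvDfsLoop g "village" (5 * g.length * (g.headD []).length + 2) st.1 [] [q]
    (p.1, st.2 ++ [p.2])
  else st

def traylomonastery (grid : List (List String)) : Int :=
  let rows := grid.length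
  let cols := (grid.headD []).length    -- len(grid[0]); grid ≠ [] under Pre_
  let st := (PySem.List.pyRange 0 (rows : Int)).foldl (fun st row =>
      (PySem.List.pyRange 0 (cols : Int)).foldl
        (fun st col => pvAStep grid st (row, col)) st)
    (PySem.Set.empty, ([] : List (List (Int × Int))))
  let count := st.2.foldl (fun n cl => if pvContains4 cl then n + 1 else n) (0 : Int)
  count * 7

-- ===== PORT B =====

-- B's inline 4-in-a-row test: scan the cell list, membership via set(cells).
def pvHasRun (cells : List (Int × Int)) : Bool :=
  let s := PySem.Set.ofList cells
  cells.any (fun p =>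
    ((PySem.List.pyRange 0 4).all (fun i => PySem.Set.contains s (p.1, p.2 + i))) ||
    ((PySem.List.pyRange 0 4).all (fun i => PySem.Set.contains s (p.1 + i, p.2))))

-- one scan step of B's labeling pass
def pvLabelStep (grid : List (List String))
    (st : PySem.Dict (Int × Int) Int × Int) (r c : Int) :
    PySem.Dict (Int × Int) Int × Int :=
  if ¬ (pvCell2 grid r c == some "village") then st
  else
    let label := st.1
    let nxt := st.2
    match label.get? (r, c - 1), label.get? (r - 1, c) with
    | none, none => (label.insert (r, c) nxt, nxt + 1)
    | none, some u => (label.insert (r, c) u, nxt)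
    | some l, none => (label.insert (r, c) l, nxt)
    | some l, some u =>
      if u == l then (label.insert (r, c) l, nxt)
      else
        let label' := label.insert (r, c) l
        (label'.keys.foldl (fun d k => if d.getD k 0 == u then d.insert k l else d) label', nxt)

def traylomonastery_alt (grid : List (List String)) : Int :=
  let rows := grid.length
  let cols := (grid.headD []).length    -- len(grid[0]) if grid else 0
  let fin := (PySem.List.pyRange 0 (rows : Int)).foldl (fun st r =>
      (PySem.List.pyRange 0 (cols : Int)).foldl (fun st c => pvLabelStep grid st r c) st)
    ((PySem.Dict.empty : PySem.Dict (Int × Int) Int), (0 : Int))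
  let groups := fin.1.items.foldl
    (fun g it => PySem.Dict.modify g it.2 [] (fun cs => cs ++ [it.1]))
    (PySem.Dict.empty : PySem.Dict Int (List (Int × Int)))
  let count := groups.values.foldl (fun n cells => if pvHasRun cells then n + 1 else n) (0 : Int)
  count * 7

-- ===== PRECONDITION & SPEC =====
-- Pre_ excludes exactly the inputs where A raises IndexError: grids containing a row
-- shorter than the first row (grid[r][c] fails during the scan).
def Pre_traylomonastery (grid : List (List String)) : Prop :=
  ∀ row ∈ grid, (grid.headD []).length ≤ row.length
instance (grid : List (List String)) : Decidable (Pre_traylomonastery grid) := by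
  unfold Pre_traylomonastery; infer_instance

def pvWitness_traylomonastery : List (List String) :=
  [["village", "village"], ["forest", "village"]]

def Spec_traylomonastery (grid : List (List String)) (out : Int) : Prop := out = traylomonastery_alt grid
instance (grid : List (List String)) (out : Int) : Decidable (Spec_traylomonastery grid out) := by unfold Spec_traylomonastery; infer_instance

-- ===== CLAIM (what is proved, stated in full; the proofs are below) =====
def Claim_equal_traylomonastery : Prop := ∀ (grid : List (List String)), Dom_traylomonastery grid → Pre_traylomonastery grid → Spec_traylomonastery grid (traylomonastery grid)

-- ===== LEMMAS AND PROOFS =====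
-- ===== graph infrastructure =====
def pvInB (grid : List (List String)) (p : Int × Int) : Prop :=
  0 ≤ p.1 ∧ p.1 < (grid.length : Int) ∧ 0 ≤ p.2 ∧ p.2 < (((grid.headD []).length : Nat) : Int)

def pvVil (grid : List (List String)) (p : Int × Int) : Prop :=
  pvInB grid p ∧ pvCell2 grid p.1 p.2 = some "village"

def pvAdj (grid : List (List String)) (p q : Int × Int) : Prop :=
  pvVil grid p ∧ pvVil grid q ∧ ((p.1 - q.1).natAbs + (p.2 - q.2).natAbs = 1)

def pvReach (grid : List (List String)) : (Int × Int) → (Int × Int) → Prop :=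
  Relation.ReflTransGen (pvAdj grid)

def pvAdjS (grid : List (List String)) (S : (Int × Int) → Prop) (a b : Int × Int) : Prop :=
  pvAdj grid a b ∧ S a ∧ S b

def pvReachS (grid : List (List String)) (S : (Int × Int) → Prop) : (Int × Int) → (Int × Int) → Prop :=
  Relation.ReflTransGen (pvAdjS grid S)

lemma pvAdj_symm {g : List (List String)} : Symmetric (pvAdj g) := by
  rintro p q ⟨h1, h2, h3⟩; exact ⟨h2, h1, by omega⟩

lemma pvReach_symm {g : List (List String)} {p q : Int × Int} (h : pvReach g p q) : pvReach g q p :=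
  Relation.ReflTransGen.symmetric pvAdj_symm h

lemma pvAdj_irrefl {g : List (List String)} (p : Int × Int) : ¬ pvAdj g p p := by
  rintro ⟨-, -, h⟩; omega

lemma pvReach_vil {g : List (List String)} {p q : Int × Int}
    (hp : pvVil g p) (h : pvReach g p q) : pvVil g q := by
  induction h with
  | refl => exact hp
  | tail _ h2 _ => exact h2.2.1

lemma pvAdj_nbr {g : List (List String)} {x n : Int × Int} (h : pvAdj g x n) :
    (n.1 = x.1 + 1 ∧ n.2 = x.2) ∨ (n.1 = x.1 - 1 ∧ n.2 = x.2) ∨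
    (n.2 = x.2 + 1 ∧ n.1 = x.1) ∨ (n.2 = x.2 - 1 ∧ n.1 = x.1) := by
  obtain ⟨-, -, h⟩ := h; omega

lemma pvReachS_mono {g : List (List String)} {S T : (Int × Int) → Prop}
    (h : ∀ y, S y → T y) {a b : Int × Int} (hr : pvReachS g S a b) : pvReachS g T a b := by
  refine Relation.ReflTransGen.mono ?_ hr
  rintro x y ⟨h1, h2, h3⟩; exact ⟨h1, h x h2, h y h3⟩

lemma pvReachS_congr {g : List (List String)} {S T : (Int × Int) → Prop}
    (h : ∀ y, S y ↔ T y) {a b : Int × Int} : pvReachS g S a b ↔ pvReachS g T a b :=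
  ⟨pvReachS_mono (fun y => (h y).1), pvReachS_mono (fun y => (h y).2)⟩

lemma pvReachS_symm {g : List (List String)} {S : (Int × Int) → Prop} {a b : Int × Int}
    (h : pvReachS g S a b) : pvReachS g S b a :=
  Relation.ReflTransGen.symmetric (fun _ _ hx => ⟨pvAdj_symm hx.1, hx.2.2, hx.2.1⟩) h

lemma pvReachS_top {g : List (List String)} {a b : Int × Int} :
    pvReachS g (fun q => pvInB g q) a b ↔ pvReach g a b := by
  constructor
  · exact Relation.ReflTransGen.mono (fun x y h => h.1)
  · exact Relation.ReflTransGen.mono (fun x y h => ⟨h, h.1.1, h.2.1.1⟩)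

lemma pvReachS_add_nonvil {g : List (List String)} {S : (Int × Int) → Prop} {p a b : Int × Int}
    (hnp : ¬ pvVil g p) :
    pvReachS g (fun y => S y ∨ y = p) a b ↔ pvReachS g S a b := by
  constructor
  · refine Relation.ReflTransGen.mono ?_
    rintro x y ⟨h1, h2, h3⟩
    refine ⟨h1, ?_, ?_⟩
    · rcases h2 with h | rfl
      · exact h
      · exact absurd h1.1 hnp
    · rcases h3 with h | rfl
      · exact h
      · exact absurd h1.2.1 hnp
  · exact pvReachS_mono (fun y h => Or.inl h)

-- removing a vertex x from the "allowed targets" of an avoid-path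
lemma pvRA_remove {g : List (List String)} {V : (Int × Int) → Prop} {x s q : Int × Int}
    (h : Relation.ReflTransGen (fun a b => pvAdj g a b ∧ ¬ V b) s q) (hq : q ≠ x) :
    (s ≠ x ∧ Relation.ReflTransGen (fun a b => pvAdj g a b ∧ ¬ (V b ∨ b = x)) s q) ∨
    (∃ n, pvAdj g x n ∧ ¬ V n ∧ n ≠ x ∧
      Relation.ReflTransGen (fun a b => pvAdj g a b ∧ ¬ (V b ∨ b = x)) n q) := by
  induction h using Relation.ReflTransGen.head_induction_on with
  | refl => exact Or.inl ⟨hq, Relation.ReflTransGen.refl⟩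
  | @head a c h' _ ih =>
    rcases ih with ⟨hcx, hpath⟩ | hex
    · by_cases hax : a = x
      · subst hax
        exact Or.inr ⟨c, h'.1, h'.2, hcx, hpath⟩
      · exact Or.inl ⟨hax, Relation.ReflTransGen.head ⟨h'.1, by rintro (hv | rfl); exacts [h'.2 hv, hcx rfl]⟩ hpath⟩
    · exact Or.inr hex

-- the master "add a vertex p" lemma for restricted reachability
lemma pvReachS_add_master {g : List (List String)} {S : (Int × Int) → Prop} {p b : Int × Int} :
    ∀ {a : Int × Int}, pvReachS g (fun y => S y ∨ y = p) a b →
    (a ≠ p ∧ b ≠ p ∧ (pvReachS g S a b ∨ ∃ m n, (pvAdj g p m ∧ S m) ∧ (pvAdj g p n ∧ S n) ∧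
        pvReachS g S a m ∧ pvReachS g S n b))
    ∨ (a = p ∧ b = p)
    ∨ (a = p ∧ b ≠ p ∧ ∃ n, (pvAdj g p n ∧ S n) ∧ pvReachS g S n b)
    ∨ (a ≠ p ∧ b = p ∧ ∃ m, (pvAdj g p m ∧ S m) ∧ pvReachS g S a m) := by
  intro a h
  induction h using Relation.ReflTransGen.head_induction_on with
  | refl =>
    by_cases hb : b = p
    · exact Or.inr (Or.inl ⟨hb, hb⟩)
    · exact Or.inl ⟨hb, hb, Or.inl Relation.ReflTransGen.refl⟩
  | @head a c h' _ ih =>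
    obtain ⟨hadj, hSa, hSc⟩ := h'
    by_cases hap : a = p
    · subst hap
      have hcp : c ≠ a := fun hcp => pvAdj_irrefl _ (hcp ▸ hadj)
      have hSc' : S c := hSc.resolve_right hcp
      have hNc : pvAdj g a c ∧ S c := ⟨hadj, hSc'⟩
      rcases ih with ⟨-, hbp, hor⟩ | ⟨hcp', -⟩ | ⟨hcp', -, -⟩ | ⟨-, hbp, m, hNm, hm⟩
      · rcases hor with hr | ⟨m, n, hNm, hNn, hcm, hnb⟩
        · exact Or.inr (Or.inr (Or.inl ⟨rfl, hbp, c, hNc, hr⟩))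
        · exact Or.inr (Or.inr (Or.inl ⟨rfl, hbp, n, hNn, hnb⟩))
      · exact absurd hcp' hcp
      · exact absurd hcp' hcp
      · exact Or.inr (Or.inl ⟨rfl, hbp⟩)
    · have hSa' : S a := hSa.resolve_right hap
      by_cases hcp : c = p
      · subst hcp
        have hNa : pvAdj g c a ∧ S a := ⟨pvAdj_symm hadj, hSa'⟩
        rcases ih with ⟨hcp', -⟩ | ⟨-, hbp⟩ | ⟨-, hbp, n, hNn, hnb⟩ | ⟨hcp', -⟩
        · exact absurd rfl hcp'
        · exact Or.inr (Or.inr (Or.inr ⟨hap, hbp, a, hNa, Relation.ReflTransGen.refl⟩))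
        · exact Or.inl ⟨hap, hbp, Or.inr ⟨a, n, hNa, hNn, Relation.ReflTransGen.refl, hnb⟩⟩
        · exact absurd rfl hcp'
      · have hSc' : S c := hSc.resolve_right hcp
        have hstep : pvAdjS g S a c := ⟨hadj, hSa', hSc'⟩
        rcases ih with ⟨-, hbp, hor⟩ | ⟨hcp', -⟩ | ⟨hcp', -⟩ | ⟨-, hbp, m, hNm, hcm⟩
        · rcases hor with hr | ⟨m, n, hNm, hNn, hcm, hnb⟩
          · exact Or.inl ⟨hap, hbp, Or.inl (Relation.ReflTransGen.head hstep hr)⟩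
          · exact Or.inl ⟨hap, hbp, Or.inr ⟨m, n, hNm, hNn, Relation.ReflTransGen.head hstep hcm, hnb⟩⟩
        · exact absurd hcp' hcp
        · exact absurd hcp' hcp
        · exact Or.inr (Or.inr (Or.inr ⟨hap, hbp, m, hNm, Relation.ReflTransGen.head hstep hcm⟩))

lemma pvReachS_add_iff {g : List (List String)} {S : (Int × Int) → Prop} {p a b : Int × Int}
    (ha : a ≠ p) (hb : b ≠ p) :
    pvReachS g (fun y => S y ∨ y = p) a b ↔
      (pvReachS g S a b ∨ ∃ m n, (pvAdj g p m ∧ S m) ∧ (pvAdj g p n ∧ S n) ∧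
        pvReachS g S a m ∧ pvReachS g S n b) := by
  constructor
  · intro h
    rcases pvReachS_add_master h with ⟨-, -, hor⟩ | ⟨hap, -⟩ | ⟨hap, -⟩ | ⟨-, hbp, -⟩
    · exact hor
    · exact absurd hap ha
    · exact absurd hap ha
    · exact absurd hbp hb
  · rintro (hr | ⟨m, n, ⟨hm, hSm⟩, ⟨hn, hSn⟩, ham, hnb⟩)
    · exact pvReachS_mono (fun y h => Or.inl h) hr
    · have h1 : pvReachS g (fun y => S y ∨ y = p) a m := pvReachS_mono (fun y h => Or.inl h) ham
      have h2 : pvReachS g (fun y => S y ∨ y = p) n b := pvReachS_mono (fun y h => Or.inl h) hnb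
      have hmp : pvAdjS g (fun y => S y ∨ y = p) m p := ⟨pvAdj_symm hm, Or.inl hSm, Or.inr rfl⟩
      have hpn : pvAdjS g (fun y => S y ∨ y = p) p n := ⟨hn, Or.inr rfl, Or.inl hSn⟩
      exact h1.trans ((Relation.ReflTransGen.head hmp (Relation.ReflTransGen.head hpn Relation.ReflTransGen.refl)).trans h2)

lemma pvReachS_add_left_iff {g : List (List String)} {S : (Int × Int) → Prop} {p b : Int × Int}
    (hb : b ≠ p) :
    pvReachS g (fun y => S y ∨ y = p) p b ↔
      ∃ n, (pvAdj g p n ∧ S n) ∧ pvReachS g S n b := by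
  constructor
  · intro h
    rcases pvReachS_add_master h with ⟨hap, -⟩ | ⟨-, hbp⟩ | ⟨-, -, hex⟩ | ⟨hap, -⟩
    · exact absurd rfl hap
    · exact absurd hbp hb
    · exact hex
    · exact absurd rfl hap
  · rintro ⟨n, ⟨hn, hSn⟩, hnb⟩
    have hpn : pvAdjS g (fun y => S y ∨ y = p) p n := ⟨hn, Or.inr rfl, Or.inl hSn⟩
    exact Relation.ReflTransGen.head hpn (pvReachS_mono (fun y h => Or.inl h) hnb)

-- ===== scan order =====
def pvScan (grid : List (List String)) : List (Int × Int) :=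
  (PySem.List.pyRange 0 (grid.length : Int)).flatMap
    (fun r => (PySem.List.pyRange 0 (((grid.headD []).length : Nat) : Int)).map (fun c => (r, c)))

def pvLt (q p : Int × Int) : Prop := q.1 < p.1 ∨ (q.1 = p.1 ∧ q.2 < p.2)

lemma pvScan_mem {g : List (List String)} {q : Int × Int} : q ∈ pvScan g ↔ pvInB g q := by
  simp only [pvScan, List.mem_flatMap, List.mem_map, PySem.List.mem_pyRange_one, pvInB]
  constructor
  · rintro ⟨r, ⟨h1, h2⟩, c, ⟨h3, h4⟩, rfl⟩
    exact ⟨h1, h2, h3, h4⟩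
  · rintro ⟨h1, h2, h3, h4⟩
    exact ⟨q.1, ⟨h1, h2⟩, q.2, ⟨h3, h4⟩, rfl⟩

lemma pvScan_pairwise (g : List (List String)) : (pvScan g).Pairwise pvLt := by
  rw [pvScan, List.pairwise_flatMap]
  constructor
  · intro r _
    rw [List.pairwise_map]
    exact (PySem.List.pairwise_lt_pyRange_one 0 _).imp (fun h => Or.inr ⟨rfl, h⟩)
  · refine (PySem.List.pairwise_lt_pyRange_one 0 _).imp ?_
    intro r1 r2 h
    simp only [List.mem_map]
    rintro x ⟨c1, -, rfl⟩ y ⟨c2, -, rfl⟩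
    exact Or.inl h

lemma pvLt_irrefl (p : Int × Int) : ¬ pvLt p p := by
  rintro (h | ⟨-, h⟩) <;> omega

lemma pvScan_split {g : List (List String)} {P : List (Int × Int)} {p : Int × Int}
    {suf : List (Int × Int)} (h : pvScan g = P ++ p :: suf) :
    pvInB g p ∧ p ∉ P ∧ (∀ q, q ∈ P ↔ pvInB g q ∧ pvLt q p) := by
  have hpw := pvScan_pairwise g
  rw [h] at hpw
  have hpw' := hpw.sublist (List.sublist_append_right P (p :: suf))
  refine ⟨pvScan_mem.1 (h ▸ List.mem_append_right P (List.mem_cons_self)), ?_, ?_⟩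
  · intro hmem
    exact pvLt_irrefl p ((List.pairwise_append.1 hpw).2.2 p hmem p List.mem_cons_self)
  · intro q
    constructor
    · intro hq
      refine ⟨pvScan_mem.1 (h ▸ List.mem_append_left _ hq), (List.pairwise_append.1 hpw).2.2 q hq p List.mem_cons_self⟩
    · rintro ⟨hin, hlt⟩
      have : q ∈ P ++ p :: suf := h ▸ pvScan_mem.2 hin
      rcases List.mem_append.1 this with hq | hq
      · exact hq
      · rcases List.mem_cons.1 hq with rfl | hq
        · exact absurd hlt (pvLt_irrefl q)
        · have := (List.pairwise_cons.1 hpw').1 q hq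
          rcases hlt with h1 | ⟨h1, h2⟩ <;> rcases this with h3 | ⟨h3, h4⟩ <;> omega

-- nested foldl = foldl over the scan list
lemma pvFoldl_nested {α β σ : Type} (f : σ → α → β → σ) (L1 : List α) (L2 : List β) (s : σ) :
    L1.foldl (fun s a => L2.foldl (fun s b => f s a b) s) s
      = (L1.flatMap (fun a => L2.map (fun b => (a, b)))).foldl (fun s q => f s q.1 q.2) s := by
  induction L1 generalizing s with
  | nil => rfl
  | cons a L1 ih => simp only [List.flatMap_cons, List.foldl_append, List.foldl_map, List.foldl_cons, ih]
-- ===== A-side: dfs loop =====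
def pvCellF (g : List (List String)) : Finset (Int × Int) :=
  (Finset.range g.length ×ˢ Finset.range (g.headD []).length).image
    (fun ab => ((ab.1 : Int), (ab.2 : Int)))

lemma pvCellF_mem {g : List (List String)} {p : Int × Int} : p ∈ pvCellF g ↔ pvInB g p := by
  simp only [pvCellF, Finset.mem_image, Finset.mem_product, Finset.mem_range, pvInB]
  constructor
  · rintro ⟨⟨a, b⟩, ⟨h1, h2⟩, rfl⟩
    constructor
    · omega
    refine ⟨?_, by omega, ?_⟩ <;> exact_mod_cast by omega
  · rintro ⟨h1, h2, h3, h4⟩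
    refine ⟨(p.1.toNat, p.2.toNat), ⟨by omega, by omega⟩, ?_⟩
    have e1 : (p.1.toNat : Int) = p.1 := by omega
    have e2 : (p.2.toNat : Int) = p.2 := by omega
    simp [e1, e2]

lemma pvVil_length_le {g : List (List String)} {v : List (Int × Int)}
    (hnd : v.Nodup) (hv : ∀ x ∈ v, pvVil g x) :
    v.length ≤ g.length * (g.headD []).length := by
  have h1 : v.toFinset ⊆ pvCellF g := by
    intro x hx
    exact pvCellF_mem.2 (hv x (List.mem_toFinset.1 hx)).1
  have h2 := Finset.card_le_card h1
  rw [List.toFinset_card_of_nodup hnd] at h2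
  calc v.length ≤ (pvCellF g).card := h2
    _ ≤ _ := by
        refine (Finset.card_image_le).trans ?_
        simp [Finset.card_product]

lemma pvPushed_mem {g : List (List String)} {x n : Int × Int} :
    n ∈ (pvDirs.map (fun d => (x.1 + d.1, x.2 + d.2))).filter
        (fun n => decide (0 ≤ n.1) && decide (n.1 < (g.length : Int)) &&
                  decide (0 ≤ n.2) && decide (n.2 < (((g.headD []).length : Nat) : Int))) ↔
      (pvInB g n ∧ ((n.1 = x.1 + 1 ∧ n.2 = x.2) ∨ (n.1 = x.1 - 1 ∧ n.2 = x.2) ∨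
        (n.2 = x.2 + 1 ∧ n.1 = x.1) ∨ (n.2 = x.2 - 1 ∧ n.1 = x.1))) := by
  simp only [List.mem_filter, List.mem_map, pvDirs, pvInB]
  constructor
  · rintro ⟨⟨d, hd, rfl⟩, hb⟩
    simp only [Bool.and_eq_true, decide_eq_true_eq] at hb
    refine ⟨⟨hb.1.1.1, hb.1.1.2, hb.1.2, hb.2⟩, ?_⟩
    fin_cases hd <;> simp <;> omega
  · rintro ⟨⟨h1, h2, h3, h4⟩, hc⟩
    refine ⟨?_, by simp only [Bool.and_eq_true, decide_eq_true_eq]; exact ⟨⟨⟨h1, h2⟩, h3⟩, h4⟩⟩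
    rcases hc with ⟨e1, e2⟩ | ⟨e1, e2⟩ | ⟨e1, e2⟩ | ⟨e1, e2⟩
    · exact ⟨(1, 0), by simp, by ext <;> simp <;> omega⟩
    · exact ⟨(-1, 0), by simp, by ext <;> simp <;> omega⟩
    · exact ⟨(0, 1), by simp, by ext <;> simp <;> omega⟩
    · exact ⟨(0, -1), by simp, by ext <;> simp <;> omega⟩

lemma pvDfsLoop_cons (g : List (List String)) (tt : String) (fuel : Nat)
    (v cl : List (Int × Int)) (x : Int × Int) (rest : List (Int × Int)) :
    pvDfsLoop g tt (fuel + 1) v cl (x :: rest) =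
      (if ¬ PySem.Set.contains v x && (pvCell2 g x.1 x.2 == some tt) then
        pvDfsLoop g tt fuel (PySem.Set.add v x) (cl ++ [x])
          (((pvDirs.map (fun d => (x.1 + d.1, x.2 + d.2))).filter
              (fun n => decide (0 ≤ n.1) && decide (n.1 < (g.length : Int)) &&
                        decide (0 ≤ n.2) && decide (n.2 < (((g.headD []).length : Nat) : Int)))).reverse ++ rest)
      else pvDfsLoop g tt fuel v cl rest) := rfl

lemma pvDfsLoop_master {g : List (List String)} {p0 : Int × Int} (hp0 : pvVil g p0)
    (vInit : List (Int × Int)) :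
    ∀ (fuel : Nat) (v cl stack : List (Int × Int)),
      v = vInit ++ cl →
      v.Nodup →
      (∀ x ∈ v, pvVil g x) →
      (∀ x ∈ cl, pvReach g p0 x) →
      (∀ x ∈ stack, pvInB g x) →
      (∀ x ∈ stack, pvVil g x → pvReach g p0 x) →
      (∀ q, pvReach g p0 q → q ∈ v ∨ ∃ s ∈ stack, s ∉ v ∧
          Relation.ReflTransGen (fun a b => pvAdj g a b ∧ b ∉ v) s q) →
      5 * (g.length * (g.headD []).length - v.length) + stack.length < fuel →
      (pvDfsLoop g "village" fuel v cl stack).1 = vInit ++ (pvDfsLoop g "village" fuel v cl stack).2 ∧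
      (pvDfsLoop g "village" fuel v cl stack).1.Nodup ∧
      (∀ x ∈ (pvDfsLoop g "village" fuel v cl stack).1, pvVil g x) ∧
      (∀ x ∈ (pvDfsLoop g "village" fuel v cl stack).2, pvReach g p0 x) ∧
      (∀ q, pvReach g p0 q → q ∈ (pvDfsLoop g "village" fuel v cl stack).1) := by
  intro fuel
  induction fuel with
  | zero => intro v cl stack _ _ _ _ _ _ _ hf; omega
  | succ fuel ih =>
    intro v cl stack hv hnd hvil hcl hstkb hstkr hcomp hf
    match stack with
    | [] =>
      refine ⟨hv, hnd, hvil, hcl, ?_⟩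
      intro q hq
      rcases hcomp q hq with h | ⟨s, hs, -⟩
      · exact h
      · exact absurd hs (List.not_mem_nil)
    | x :: rest =>
      by_cases hmem : x ∈ v
      · -- guard false: already visited
        have hc : PySem.Set.contains v x = true := (PySem.Set.contains_iff v x).2 hmem
        have hred : pvDfsLoop g "village" (fuel + 1) v cl (x :: rest) =
            pvDfsLoop g "village" fuel v cl rest := by
          rw [pvDfsLoop_cons, hc]; simp
        rw [hred]
        refine ih v cl rest hv hnd hvil hcl (fun y hy => hstkb y (List.mem_cons_of_mem _ hy))
          (fun y hy => hstkr y (List.mem_cons_of_mem _ hy)) ?_ (by simp at hf ⊢; omega)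
        intro q hq
        rcases hcomp q hq with h | ⟨s, hs, hsv, hpath⟩
        · exact Or.inl h
        rcases List.mem_cons.1 hs with rfl | hs'
        · exact absurd hmem hsv
        · exact Or.inr ⟨s, hs', hsv, hpath⟩
      · by_cases hcell : pvCell2 g x.1 x.2 = some "village"
        · -- guard true: process x
          have hvx : pvVil g x := ⟨hstkb x List.mem_cons_self, hcell⟩
          have hreach_x : pvReach g p0 x := hstkr x List.mem_cons_self hvx
          have hc : PySem.Set.contains v x = false := by
            rw [← Bool.not_eq_true, PySem.Set.contains_iff]; exact hmem
          have hadd : PySem.Set.add v x = v ++ [x] := PySem.Set.add_of_not_mem hmem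
          set pushed := (pvDirs.map (fun d => (x.1 + d.1, x.2 + d.2))).filter
            (fun n => decide (0 ≤ n.1) && decide (n.1 < (g.length : Int)) &&
                      decide (0 ≤ n.2) && decide (n.2 < (((g.headD []).length : Nat) : Int))) with hpushdef
          have hred : pvDfsLoop g "village" (fuel + 1) v cl (x :: rest) =
              pvDfsLoop g "village" fuel (v ++ [x]) (cl ++ [x]) (pushed.reverse ++ rest) := by
            rw [pvDfsLoop_cons, hc, hcell, ← hpushdef, ← hadd]
            simp
          rw [hred]
          have hnd' : (v ++ [x]).Nodup := by
            simp only [List.nodup_append, List.nodup_singleton]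
            exact ⟨hnd, trivial, fun a ha b hb he => hmem (by subst he; rw [List.mem_singleton] at hb; subst hb; exact ha)⟩
          have hvil' : ∀ y ∈ v ++ [x], pvVil g y := by
            intro y hy
            rcases List.mem_append.1 hy with h | h
            · exact hvil y h
            · simp at h; subst h; exact hvx
          have hlen : (v ++ [x]).length ≤ g.length * (g.headD []).length :=
            pvVil_length_le hnd' hvil'
          have hpushlen : pushed.length ≤ 4 := by
            calc pushed.length ≤ (pvDirs.map (fun d => (x.1 + d.1, x.2 + d.2))).length :=
                  List.length_filter_le _ _
              _ = 4 := by simp [pvDirs]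
          refine ih (v ++ [x]) (cl ++ [x]) (pushed.reverse ++ rest) (by rw [hv, List.append_assoc])
            hnd' hvil' ?_ ?_ ?_ ?_ ?_
          · intro y hy
            rcases List.mem_append.1 hy with h | h
            · exact hcl y h
            · simp at h; subst h; exact hreach_x
          · intro y hy
            rcases List.mem_append.1 hy with h | h
            · exact (pvPushed_mem.1 (List.mem_reverse.1 h)).1
            · exact hstkb y (List.mem_cons_of_mem _ h)
          · intro y hy hvy
            rcases List.mem_append.1 hy with h | h
            · have := (pvPushed_mem.1 (List.mem_reverse.1 h)).2
              refine hreach_x.tail ⟨hvx, hvy, ?_⟩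
              omega
            · exact hstkr y (List.mem_cons_of_mem _ h) hvy
          · -- completeness
            intro q hq
            by_cases hqv : q ∈ v ++ [x]
            · exact Or.inl hqv
            have hqx : q ≠ x := by
              intro h; exact hqv (h ▸ List.mem_append_right _ (List.mem_singleton.2 rfl))
            rcases hcomp q hq with h | ⟨s, hs, hsv, hpath⟩
            · exact absurd (List.mem_append_left _ h) hqv
            rcases pvRA_remove hpath hqx with ⟨hsx, hpath'⟩ | ⟨n, hadjn, hnv, hnx, hpath'⟩
            · -- s still a witness; s ∈ rest (s ≠ x) or s = x excluded
              have hs' : s ∈ rest := by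
                rcases List.mem_cons.1 hs with rfl | h
                · exact absurd rfl hsx
                · exact h
              refine Or.inr ⟨s, List.mem_append_right _ hs', ?_, ?_⟩
              · simp only [List.mem_append, List.mem_singleton]
                rintro (h | h)
                · exact hsv h
                · exact hsx h
              · refine hpath'.mono ?_
                rintro a b ⟨h1, h2⟩
                refine ⟨h1, ?_⟩
                simp only [List.mem_append, List.mem_singleton]
                rintro (h | h)
                · exact h2 (Or.inl h)
                · exact h2 (Or.inr h)
            · -- new witness n among the pushed neighbours
              have hvn : pvVil g n := hadjn.2.1
              have hnp : n ∈ pushed := by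
                rw [hpushdef, pvPushed_mem]
                have := pvAdj_nbr hadjn
                exact ⟨hvn.1, by omega⟩
              refine Or.inr ⟨n, List.mem_append_left _ (List.mem_reverse.2 hnp), ?_, ?_⟩
              · simp only [List.mem_append, List.mem_singleton]
                rintro (h | h)
                · exact hnv h
                · exact hnx h
              · refine hpath'.mono ?_
                rintro a b ⟨h1, h2⟩
                refine ⟨h1, ?_⟩
                simp only [List.mem_append, List.mem_singleton]
                rintro (h | h)
                · exact h2 (Or.inl h)
                · exact h2 (Or.inr h)
          · -- fuel
            simp only [List.length_append, List.length_reverse, List.length_cons] at hf ⊢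
            have : v.length + 1 ≤ g.length * (g.headD []).length := by
              simpa using hlen
            omega
        · -- guard false: not a village cell
          have hnvx : ¬ pvVil g x := fun h => hcell h.2
          have hcb : (pvCell2 g x.1 x.2 == some "village") = false := by
            simp [hcell]
          have hred : pvDfsLoop g "village" (fuel + 1) v cl (x :: rest) =
              pvDfsLoop g "village" fuel v cl rest := by
            rw [pvDfsLoop_cons, hcb]; simp
          rw [hred]
          refine ih v cl rest hv hnd hvil hcl (fun y hy => hstkb y (List.mem_cons_of_mem _ hy))
            (fun y hy => hstkr y (List.mem_cons_of_mem _ hy)) ?_ (by simp at hf ⊢; omega)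
          intro q hq
          rcases hcomp q hq with h | ⟨s, hs, hsv, hpath⟩
          · exact Or.inl h
          have hvq : pvVil g q := pvReach_vil hp0 hq
          rcases List.mem_cons.1 hs with rfl | hs'
          · -- s = x : impossible, x is not village but everything reachable is
            exfalso
            rcases (Relation.ReflTransGen.cases_head hpath) with rfl | ⟨c, ⟨hadj, -⟩, -⟩
            · exact hnvx hvq
            · exact hnvx hadj.1
          · exact Or.inr ⟨s, hs', hsv, hpath⟩

-- ===== A-side: outer loop =====
def pvAInv (g : List (List String)) (P : List (Int × Int))
    (st : List (Int × Int) × List (List (Int × Int))) : Prop :=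
  st.1.Nodup ∧ (∀ x ∈ st.1, pvVil g x) ∧
  (∀ x, x ∈ st.1 ↔ ∃ q ∈ P, pvVil g q ∧ pvReach g q x) ∧
  (∀ cl ∈ st.2, ∃ q ∈ P, pvVil g q ∧ (∀ x, x ∈ cl ↔ pvReach g q x)) ∧
  (∀ q ∈ P, pvVil g q → ∃ cl ∈ st.2, (∀ x, x ∈ cl ↔ pvReach g q x)) ∧
  st.2.Pairwise (fun c1 c2 => ∀ x, x ∈ c1 → x ∉ c2)

lemma pvAInv_closed {g : List (List String)} {P : List (Int × Int)}
    {st : List (Int × Int) × List (List (Int × Int))} (h : pvAInv g P st) :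
    ∀ x ∈ st.1, ∀ y, pvAdj g x y → y ∈ st.1 := by
  intro x hx y hxy
  obtain ⟨q, hq, hvq, hr⟩ := (h.2.2.1 x).1 hx
  exact (h.2.2.1 y).2 ⟨q, hq, hvq, hr.tail hxy⟩

lemma pvAStep_inv {g : List (List String)} {P : List (Int × Int)}
    {st : PySem.Set (Int × Int) × List (List (Int × Int))} {p : Int × Int}
    (hinv : pvAInv g P st) (hinb : pvInB g p) :
    pvAInv g (P ++ [p]) (pvAStep g st p) := by
  obtain ⟨hnd, hvil, hchar, hcls, hcov, hpw⟩ := hinv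
  have hstep_triv : ∀ (h : ¬ (pvVil g p ∧ p ∉ st.1)), pvAInv g (P ++ [p]) st := by
    intro h
    refine ⟨hnd, hvil, ?_, ?_, ?_, hpw⟩
    · intro x
      rw [hchar x]
      constructor
      · rintro ⟨q, hq, hvq, hr⟩; exact ⟨q, List.mem_append_left _ hq, hvq, hr⟩
      · rintro ⟨q, hq, hvq, hr⟩
        rcases List.mem_append.1 hq with hq' | hq'
        · exact ⟨q, hq', hvq, hr⟩
        · rw [List.mem_singleton] at hq'; subst hq'
          -- q = p : then p must be visited (else h gives contradiction)
          have hpv : q ∈ st.1 := by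
            by_contra hc
            exact h ⟨hvq, hc⟩
          obtain ⟨q', hq', hvq', hr'⟩ := (hchar q).1 hpv
          exact ⟨q', hq', hvq', hr'.trans hr⟩
    · intro cl hcl
      obtain ⟨q, hq, hvq, hch⟩ := hcls cl hcl
      exact ⟨q, List.mem_append_left _ hq, hvq, hch⟩
    · intro q hq hvq
      rcases List.mem_append.1 hq with hq' | hq'
      · exact hcov q hq' hvq
      · rw [List.mem_singleton] at hq'; subst hq'
        have hpv : q ∈ st.1 := by
          by_contra hc
          exact h ⟨hvq, hc⟩
        obtain ⟨q', hq', hvq', hr'⟩ := (hchar q).1 hpv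
        obtain ⟨cl, hcl, hch⟩ := hcov q' hq' hvq'
        refine ⟨cl, hcl, fun x => ?_⟩
        rw [hch x]
        constructor
        · intro h'; exact ((pvReach_symm hr').trans h')
        · intro h'; exact (hr'.trans h')
  by_cases hmem : p ∈ st.1
  · have hc : PySem.Set.contains st.1 p = true := (PySem.Set.contains_iff _ p).2 hmem
    have : pvAStep g st p = st := by
      unfold pvAStep; rw [hc]; simp
    rw [this]
    exact hstep_triv (fun h => h.2 hmem)
  · by_cases hcell : pvCell2 g p.1 p.2 = some "village"
    · -- run dfs
      have hvp : pvVil g p := ⟨hinb, hcell⟩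
      have hc : PySem.Set.contains st.1 p = false := by
        rw [← Bool.not_eq_true, PySem.Set.contains_iff]; exact hmem
      have hstep : pvAStep g st p =
          ((pvDfsLoop g "village" (5 * g.length * (g.headD []).length + 2) st.1 [] [p]).1,
            st.2 ++ [(pvDfsLoop g "village" (5 * g.length * (g.headD []).length + 2) st.1 [] [p]).2]) := by
        unfold pvAStep; rw [hc, hcell]; simp
      have hclosed := pvAInv_closed ⟨hnd, hvil, hchar, hcls, hcov, hpw⟩
      -- initial completeness: avoid-paths exist from p
      have hinit : ∀ q, pvReach g p q → q ∉ st.1 ∧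
          Relation.ReflTransGen (fun a b => pvAdj g a b ∧ b ∉ st.1) p q := by
        intro q hq
        induction hq with
        | refl => exact ⟨hmem, Relation.ReflTransGen.refl⟩
        | @tail b c hr hadj ih =>
          obtain ⟨hbv, hpath⟩ := ih
          have hcv : c ∉ st.1 := by
            intro hc'
            exact hbv (hclosed _ hc' _ (pvAdj_symm hadj))
          exact ⟨hcv, hpath.tail ⟨hadj, hcv⟩⟩
      have hlen : st.1.length ≤ g.length * (g.headD []).length := pvVil_length_le hnd hvil
      have hmaster := pvDfsLoop_master hvp st.1 (5 * g.length * (g.headD []).length + 2)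
        st.1 [] [p] (by simp) hnd hvil (by simp)
        (by intro y hy; rw [List.mem_singleton] at hy; subst hy; exact hinb)
        (by intro y hy hvy; rw [List.mem_singleton] at hy; subst hy; exact Relation.ReflTransGen.refl)
        (by
          intro q hq
          exact Or.inr ⟨p, List.mem_singleton.2 rfl, hmem, (hinit q hq).2⟩)
        (by simp only [List.length_singleton]; rw [Nat.mul_assoc]; omega)
      set res := pvDfsLoop g "village" (5 * g.length * (g.headD []).length + 2) st.1 [] [p] with hres
      obtain ⟨hv', hnd', hvil', hsound, hcomp⟩ := hmaster
      -- the new cluster is exactly the component of p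
      have hclchar : ∀ x, x ∈ res.2 ↔ pvReach g p x := by
        intro x
        refine ⟨hsound x, fun hx => ?_⟩
        have := hcomp x hx
        rw [hv'] at this
        rcases List.mem_append.1 this with h | h
        · exfalso
          obtain ⟨q', hq', hvq', hr'⟩ := (hchar x).1 h
          have : p ∈ st.1 := (hchar p).2 ⟨q', hq', hvq', hr'.trans (pvReach_symm hx)⟩
          exact hmem this
        · exact h
      rw [hstep]
      refine ⟨hv' ▸ hnd', hv' ▸ hvil', ?_, ?_, ?_, ?_⟩
      · intro x
        constructor
        · intro hx
          rw [hv'] at hx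
          rcases List.mem_append.1 hx with h | h
          · obtain ⟨q', hq', hvq', hr'⟩ := (hchar x).1 h
            exact ⟨q', List.mem_append_left _ hq', hvq', hr'⟩
          · exact ⟨p, List.mem_append_right _ (List.mem_singleton.2 rfl), hvp, hclchar x |>.1 h⟩
        · rintro ⟨q, hq, hvq, hr⟩
          rw [hv']
          rcases List.mem_append.1 hq with hq' | hq'
          · exact List.mem_append_left _ ((hchar x).2 ⟨q, hq', hvq, hr⟩)
          · rw [List.mem_singleton] at hq'; subst hq'
            exact List.mem_append_right _ ((hclchar x).2 hr)
      · intro cl hcl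
        rcases List.mem_append.1 hcl with h | h
        · obtain ⟨q, hq, hvq, hch⟩ := hcls cl h
          exact ⟨q, List.mem_append_left _ hq, hvq, hch⟩
        · rw [List.mem_singleton] at h; subst h
          exact ⟨p, List.mem_append_right _ (List.mem_singleton.2 rfl), hvp, hclchar⟩
      · intro q hq hvq
        rcases List.mem_append.1 hq with hq' | hq'
        · obtain ⟨cl, hcl, hch⟩ := hcov q hq' hvq
          exact ⟨cl, List.mem_append_left _ hcl, hch⟩
        · rw [List.mem_singleton] at hq'; subst hq'
          exact ⟨res.2, List.mem_append_right _ (List.mem_singleton.2 rfl), hclchar⟩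
      · rw [List.pairwise_append]
        refine ⟨hpw, List.pairwise_singleton _ _, ?_⟩
        intro c1 hc1 c2 hc2
        rw [List.mem_singleton] at hc2; subst hc2
        intro x hx1 hx2
        -- x in old cluster → x ∈ st.1 ; x in new cluster → x ∉ st.1
        obtain ⟨q, hq, hvq, hch⟩ := hcls c1 hc1
        have hxv : x ∈ st.1 := (hchar x).2 ⟨q, hq, hvq, (hch x).1 hx1⟩
        have : x ∉ st.1 := by
          have hnd'' := hv' ▸ hnd'
          rw [List.nodup_append] at hnd''
          exact fun hc' => (hnd''.2.2 x hc' x hx2) rfl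
        exact this hxv
    · have hcb : (pvCell2 g p.1 p.2 == some "village") = false := by simp [hcell]
      have : pvAStep g st p = st := by
        unfold pvAStep; rw [hcb]; simp
      rw [this]
      exact hstep_triv (fun h => hcell h.1.2)

lemma pvAFold {g : List (List String)} :
    ∀ (L P : List (Int × Int)) (st : PySem.Set (Int × Int) × List (List (Int × Int))),
      (∀ p ∈ L, pvInB g p) → pvAInv g P st →
      pvAInv g (P ++ L) (L.foldl (pvAStep g) st) := by
  intro L
  induction L with
  | nil => intro P st _ h; simpa using h
  | cons p L ih =>
    intro P st hb hinv
    have h1 := pvAStep_inv hinv (hb p List.mem_cons_self)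
    have h2 := ih (P ++ [p]) _ (fun q hq => hb q (List.mem_cons_of_mem _ hq)) h1
    rw [List.append_assoc] at h2
    simpa using h2

-- ===== B-side: labeling invariant =====
def pvSubst (u l t : Int) : Int := if t = u then l else t

lemma pvRelabel_fold {u l : Int} :
    ∀ (ks : List (Int × Int)) (d cur : PySem.Dict (Int × Int) Int),
      ks.Nodup →
      (∀ k ∈ ks, (d.get? k).isSome) →
      cur.keys = d.keys →
      (∀ q, cur.get? q = if q ∈ ks then d.get? q else (d.get? q).map (pvSubst u l)) →
      ((ks.foldl (fun d' k => if d'.getD k 0 == u then d'.insert k l else d') cur).keys = d.keys ∧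
       (∀ q, (ks.foldl (fun d' k => if d'.getD k 0 == u then d'.insert k l else d') cur).get? q =
          (d.get? q).map (pvSubst u l))) := by
  intro ks
  induction ks with
  | nil =>
    intro d cur _ _ hkeys hget
    exact ⟨hkeys, fun q => by simpa using hget q⟩
  | cons k ks ih =>
    intro d cur hnd hsome hkeys hget
    have hkm : k ∈ k :: ks := List.mem_cons_self
    have hcurk : cur.get? k = d.get? k := by rw [hget k]; simp
    obtain ⟨t, ht⟩ := Option.isSome_iff_exists.1 (hsome k hkm)
    have hcontains : cur.contains k = true := by
      rw [PySem.Dict.contains_eq_isSome_get?, hcurk, ht]; rfl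
    have hstep : (if cur.getD k 0 == u then cur.insert k l else cur).keys = d.keys := by
      split
      · rw [PySem.Dict.keys_insert_of_contains _ _ hcontains]; exact hkeys
      · exact hkeys
    have hmain : ∀ q, (if cur.getD k 0 == u then cur.insert k l else cur).get? q =
        if q ∈ ks then d.get? q else (d.get? q).map (pvSubst u l) := by
      intro q
      by_cases hqk : q = k
      · subst hqk
        have hqks : q ∉ ks := (List.nodup_cons.1 hnd).1
        rw [if_neg hqks]
        rw [PySem.Dict.getD_eq_get?_getD, hcurk, ht]
        by_cases htu : t = u
        · have he : ((some t).getD 0 == u) = true := by simp [htu]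
          rw [he]
          simp only [if_true]
          rw [PySem.Dict.get?_insert_self]
          simp [pvSubst, htu]
        · have he : ((some t).getD 0 == u) = false := by simp [htu]
          rw [he]
          simp only [Bool.false_eq_true, if_false]
          rw [hcurk, ht]
          simp [pvSubst, htu]
      · have he : (if cur.getD k 0 == u then cur.insert k l else cur).get? q = cur.get? q := by
          split
          · exact PySem.Dict.get?_insert_of_ne _ _ hqk
          · rfl
        rw [he, hget q]
        have hm : (q ∈ k :: ks) ↔ (q ∈ ks) := by
          simp [List.mem_cons, hqk]
        simp only [hm]
    rw [List.foldl_cons]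
    exact ih d _ (List.nodup_cons.1 hnd).2 (fun k' hk' => hsome k' (List.mem_cons_of_mem _ hk'))
      hstep hmain

def pvBInv (g : List (List String)) (P : List (Int × Int))
    (st : PySem.Dict (Int × Int) Int × Int) : Prop :=
  st.1.keys.Nodup ∧
  (∀ q, (st.1.get? q).isSome ↔ (pvVil g q ∧ q ∈ P)) ∧
  (∀ a b la lb, st.1.get? a = some la → st.1.get? b = some lb →
      (la = lb ↔ pvReachS g (· ∈ P) a b)) ∧
  (∀ a la, st.1.get? a = some la → la < st.2)

lemma pvReachS_appendP {g : List (List String)} {P : List (Int × Int)} {p a b : Int × Int} :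
    pvReachS g (· ∈ P ++ [p]) a b ↔ pvReachS g (fun y => y ∈ P ∨ y = p) a b :=
  pvReachS_congr (by intro y; simp)

lemma pvBInv_not_mem_dom {g : List (List String)} {P : List (Int × Int)}
    {st : PySem.Dict (Int × Int) Int × Int} (hinv : pvBInv g P st) {p : Int × Int}
    (hpP : p ∉ P) : st.1.get? p = none := by
  rcases h : st.1.get? p with _ | w
  · rfl
  · exact absurd ((hinv.2.1 p).1 (by rw [h]; rfl)).2 hpP

lemma pvBInv_insert_fresh {g : List (List String)} {P : List (Int × Int)}
    {d : PySem.Dict (Int × Int) Int} {nxt : Int} {p : Int × Int}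
    (hinv : pvBInv g P (d, nxt)) (hp : pvVil g p) (hpP : p ∉ P)
    (hN : ∀ n, ¬ (pvAdj g p n ∧ n ∈ P)) :
    pvBInv g (P ++ [p]) (d.insert p nxt, nxt + 1) := by
  obtain ⟨hnd, hK, hF, hB⟩ := hinv
  have hnone : d.get? p = none := pvBInv_not_mem_dom ⟨hnd, hK, hF, hB⟩ hpP
  have hcont : d.contains p = false := by
    rw [PySem.Dict.contains_eq_isSome_get?, hnone]; rfl
  have hpk : p ∉ d.keys := fun h => by
    rw [(PySem.Dict.contains_iff_mem_keys d p).2 h] at hcont; simp at hcont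
  refine ⟨?_, ?_, ?_, ?_⟩
  · rw [PySem.Dict.keys_insert_of_not_contains _ _ hcont]
    simp only [List.nodup_append, List.nodup_singleton]
    exact ⟨hnd, trivial, fun a ha b hb he => hpk (by subst he; rw [List.mem_singleton] at hb; subst hb; exact ha)⟩
  · intro q
    by_cases hqp : q = p
    · subst hqp
      rw [PySem.Dict.get?_insert_self]
      simp [hp]
    · rw [PySem.Dict.get?_insert_of_ne _ _ hqp, hK q]
      simp only [List.mem_append, List.mem_singleton, hqp, or_false]
  · intro a b la lb ha hb
    rw [pvReachS_appendP]
    by_cases hap : a = p <;> by_cases hbp : b = p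
    · subst hap; subst hbp
      rw [PySem.Dict.get?_insert_self] at ha hb
      cases ha; cases hb
      exact iff_of_true rfl Relation.ReflTransGen.refl
    · subst hap
      rw [PySem.Dict.get?_insert_self] at ha
      cases ha
      rw [PySem.Dict.get?_insert_of_ne _ _ hbp] at hb
      rw [pvReachS_add_left_iff hbp]
      constructor
      · intro h
        exact absurd h.symm (Int.ne_of_lt (hB b lb hb))
      · rintro ⟨n, hn, -⟩
        exact absurd hn (hN n)
    · subst hbp
      rw [PySem.Dict.get?_insert_self] at hb
      cases hb
      rw [PySem.Dict.get?_insert_of_ne _ _ hap] at ha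
      constructor
      · intro h
        exact absurd h (Int.ne_of_lt (hB a la ha))
      · intro h
        obtain ⟨n, hn, -⟩ := (pvReachS_add_left_iff hap).1 (pvReachS_symm h)
        exact absurd hn (hN n)
    · rw [PySem.Dict.get?_insert_of_ne _ _ hap] at ha
      rw [PySem.Dict.get?_insert_of_ne _ _ hbp] at hb
      rw [pvReachS_add_iff hap hbp]
      rw [hF a b la lb ha hb]
      constructor
      · exact Or.inl
      · rintro (h | ⟨m, n, hm, -, -, -⟩)
        · exact h
        · exact absurd hm (hN m)
  · intro a la ha
    by_cases hap : a = p
    · subst hap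
      rw [PySem.Dict.get?_insert_self] at ha
      cases ha
      omega
    · rw [PySem.Dict.get?_insert_of_ne _ _ hap] at ha
      have := hB a la ha
      omega

lemma pvBInv_insert_single {g : List (List String)} {P : List (Int × Int)}
    {d : PySem.Dict (Int × Int) Int} {nxt w : Int} {p : Int × Int}
    (hinv : pvBInv g P (d, nxt)) (hp : pvVil g p) (hpP : p ∉ P)
    (hN : ∀ n, (pvAdj g p n ∧ n ∈ P) → d.get? n = some w)
    (hNne : ∃ n, (pvAdj g p n ∧ n ∈ P)) :
    pvBInv g (P ++ [p]) (d.insert p w, nxt) := by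
  obtain ⟨hnd, hK, hF, hB⟩ := hinv
  have hnone : d.get? p = none := pvBInv_not_mem_dom ⟨hnd, hK, hF, hB⟩ hpP
  have hcont : d.contains p = false := by
    rw [PySem.Dict.contains_eq_isSome_get?, hnone]; rfl
  have hpk : p ∉ d.keys := fun h => by
    rw [(PySem.Dict.contains_iff_mem_keys d p).2 h] at hcont; simp at hcont
  obtain ⟨n0, hn0⟩ := hNne
  have hn0w : d.get? n0 = some w := hN n0 hn0
  have hnP : n0 ∈ P := hn0.2
  refine ⟨?_, ?_, ?_, ?_⟩
  · rw [PySem.Dict.keys_insert_of_not_contains _ _ hcont]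
    simp only [List.nodup_append, List.nodup_singleton]
    exact ⟨hnd, trivial, fun a ha b hb he => hpk (by subst he; rw [List.mem_singleton] at hb; subst hb; exact ha)⟩
  · intro q
    by_cases hqp : q = p
    · subst hqp
      rw [PySem.Dict.get?_insert_self]
      simp [hp]
    · rw [PySem.Dict.get?_insert_of_ne _ _ hqp, hK q]
      simp only [List.mem_append, List.mem_singleton, hqp, or_false]
  · intro a b la lb ha hb
    rw [pvReachS_appendP]
    by_cases hap : a = p <;> by_cases hbp : b = p
    · subst hap; subst hbp
      rw [PySem.Dict.get?_insert_self] at ha hb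
      cases ha; cases hb
      exact iff_of_true rfl Relation.ReflTransGen.refl
    · subst hap
      rw [PySem.Dict.get?_insert_self] at ha
      cases ha
      rw [PySem.Dict.get?_insert_of_ne _ _ hbp] at hb
      rw [pvReachS_add_left_iff hbp]
      constructor
      · intro h
        exact ⟨n0, hn0, (hF n0 b w lb hn0w hb).1 h⟩
      · rintro ⟨n, hn, hr⟩
        exact (hF n b w lb (hN n hn) hb).2 hr
    · subst hbp
      rw [PySem.Dict.get?_insert_self] at hb
      cases hb
      rw [PySem.Dict.get?_insert_of_ne _ _ hap] at ha
      constructor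
      · intro h
        exact pvReachS_symm ((pvReachS_add_left_iff hap).2
          ⟨n0, hn0, pvReachS_symm ((hF a n0 la w ha hn0w).1 h)⟩)
      · intro h
        obtain ⟨n, hn, hr⟩ := (pvReachS_add_left_iff hap).1 (pvReachS_symm h)
        exact ((hF n a w la (hN n hn) ha).2 hr).symm
    · rw [PySem.Dict.get?_insert_of_ne _ _ hap] at ha
      rw [PySem.Dict.get?_insert_of_ne _ _ hbp] at hb
      rw [pvReachS_add_iff hap hbp]
      rw [hF a b la lb ha hb]
      constructor
      · exact Or.inl
      · rintro (h | ⟨m, n, hm, hn, ham, hnb⟩)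
        · exact h
        · have h1 : la = w := (hF a m la w ha (hN m hm)).2 ham
          have h2 : w = lb := (hF n b w lb (hN n hn) hb).2 hnb
          exact (hF a b la lb ha hb).1 (h1.trans h2)
  · intro a la ha
    by_cases hap : a = p
    · subst hap
      rw [PySem.Dict.get?_insert_self] at ha
      cases ha
      exact hB n0 _ hn0w
    · rw [PySem.Dict.get?_insert_of_ne _ _ hap] at ha
      exact hB a la ha

lemma pvSubst_eq_iff {u l ta tb : Int} (_hul : u ≠ l) :
    pvSubst u l ta = pvSubst u l tb ↔
      (ta = tb ∨ ((ta = l ∨ ta = u) ∧ (tb = l ∨ tb = u))) := by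
  unfold pvSubst; split_ifs <;> omega

lemma pvSubst_self_l {u l : Int} (hul : u ≠ l) : pvSubst u l l = l := by
  unfold pvSubst; exact if_neg (fun h : l = u => hul h.symm)

lemma pvLabelStep_inv {g : List (List String)} {P suf : List (Int × Int)} {p : Int × Int}
    {st : PySem.Dict (Int × Int) Int × Int}
    (hscan : pvScan g = P ++ p :: suf) (hinv : pvBInv g P st) :
    pvBInv g (P ++ [p]) (pvLabelStep g st p.1 p.2) := by
  obtain ⟨hinb, hpP, hPchar⟩ := pvScan_split hscan
  by_cases hcell : pvCell2 g p.1 p.2 = some "village"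
  case neg =>
    have hg : (pvCell2 g p.1 p.2 == some "village") = false := by simp [hcell]
    have hstep : pvLabelStep g st p.1 p.2 = st := by
      unfold pvLabelStep; rw [hg]; simp
    rw [hstep]
    obtain ⟨hnd, hK, hF, hB⟩ := hinv
    have hnp : ¬ pvVil g p := fun h => hcell h.2
    refine ⟨hnd, ?_, ?_, hB⟩
    · intro q; rw [hK q]
      constructor
      · rintro ⟨h1, h2⟩; exact ⟨h1, List.mem_append_left _ h2⟩
      · rintro ⟨h1, h2⟩
        rcases List.mem_append.1 h2 with h | h
        · exact ⟨h1, h⟩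
        · rw [List.mem_singleton] at h; subst h; exact absurd h1 hnp
    · intro a b la lb ha hb
      rw [pvReachS_appendP, pvReachS_add_nonvil hnp]
      exact hF a b la lb ha hb
  case pos =>
    have hvp : pvVil g p := ⟨hinb, hcell⟩
    have hg : (pvCell2 g p.1 p.2 == some "village") = true := by simp [hcell]
    have hNchar : ∀ n, (pvAdj g p n ∧ n ∈ P) ↔
        ((n = (p.1, p.2 - 1) ∨ n = (p.1 - 1, p.2)) ∧ (st.1.get? n).isSome) := by
      intro n
      constructor
      · rintro ⟨hadj, hnP⟩
        obtain ⟨hnb, hlt⟩ := (hPchar n).1 hnP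
        have h2 := pvAdj_nbr hadj
        refine ⟨?_, (hinv.2.1 n).2 ⟨hadj.2.1, hnP⟩⟩
        obtain ⟨n1, n2⟩ := n
        simp only [Prod.mk.injEq]
        simp only at h2
        rcases hlt with h3 | ⟨h3, h4⟩ <;> omega
      · rintro ⟨hor, hsome⟩
        obtain ⟨hVn, hnP⟩ := (hinv.2.1 n).1 hsome
        refine ⟨⟨hvp, hVn, ?_⟩, hnP⟩
        rcases hor with rfl | rfl
        · show (p.1 - p.1).natAbs + (p.2 - (p.2 - 1)).natAbs = 1
          omega
        · show (p.1 - (p.1 - 1)).natAbs + (p.2 - p.2).natAbs = 1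
          omega
    rcases hL : st.1.get? (p.1, p.2 - 1) with _ | l <;>
      rcases hU : st.1.get? (p.1 - 1, p.2) with _ | u
    · -- fresh
      have hstep : pvLabelStep g st p.1 p.2 = (st.1.insert (p.1, p.2) st.2, st.2 + 1) := by
        simp only [pvLabelStep, hg, hL, hU, not_true, if_false]
      rw [hstep]
      refine pvBInv_insert_fresh hinv hvp hpP ?_
      intro n hn
      rcases (hNchar n).1 hn with ⟨rfl | rfl, hs⟩
      · rw [hL] at hs; exact Bool.false_ne_true hs
      · rw [hU] at hs; exact Bool.false_ne_true hs
    · -- only up neighbour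
      have hstep : pvLabelStep g st p.1 p.2 = (st.1.insert (p.1, p.2) u, st.2) := by
        simp only [pvLabelStep, hg, hL, hU, not_true, if_false]
      rw [hstep]
      refine pvBInv_insert_single hinv hvp hpP ?_ ?_
      · intro n hn
        rcases (hNchar n).1 hn with ⟨rfl | rfl, hs⟩
        · rw [hL] at hs; exact absurd hs Bool.false_ne_true
        · exact hU
      · exact ⟨(p.1 - 1, p.2), (hNchar _).2 ⟨Or.inr rfl, by rw [hU]; rfl⟩⟩
    · -- only left neighbour
      have hstep : pvLabelStep g st p.1 p.2 = (st.1.insert (p.1, p.2) l, st.2) := by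
        simp only [pvLabelStep, hg, hL, hU, not_true, if_false]
      rw [hstep]
      refine pvBInv_insert_single hinv hvp hpP ?_ ?_
      · intro n hn
        rcases (hNchar n).1 hn with ⟨rfl | rfl, hs⟩
        · exact hL
        · rw [hU] at hs; exact absurd hs Bool.false_ne_true
      · exact ⟨(p.1, p.2 - 1), (hNchar _).2 ⟨Or.inl rfl, by rw [hL]; rfl⟩⟩
    · -- both neighbours
      by_cases hul : u = l
      · subst hul
        have hstep : pvLabelStep g st p.1 p.2 = (st.1.insert (p.1, p.2) u, st.2) := by
          simp only [pvLabelStep, hg, hL, hU, not_true, if_false, if_true, beq_self_eq_true]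
        rw [hstep]
        refine pvBInv_insert_single hinv hvp hpP ?_ ?_
        · intro n hn
          rcases (hNchar n).1 hn with ⟨rfl | rfl, hs⟩
          · exact hL
          · exact hU
        · exact ⟨(p.1, p.2 - 1), (hNchar _).2 ⟨Or.inl rfl, by rw [hL]; rfl⟩⟩
      · -- merge: relabel class of u to l
        obtain ⟨hnd, hK, hF, hB⟩ := hinv
        have hnone : st.1.get? (p.1, p.2) = none := by
          have := pvBInv_not_mem_dom ⟨hnd, hK, hF, hB⟩ hpP
          exact this
        have hcont : st.1.contains (p.1, p.2) = false := by
          rw [PySem.Dict.contains_eq_isSome_get?, hnone]; rfl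
        have hpk : (p.1, p.2) ∉ st.1.keys := fun h => by
          rw [(PySem.Dict.contains_iff_mem_keys _ _).2 h] at hcont; simp at hcont
        set d1 := st.1.insert (p.1, p.2) l with hd1
        have hkeys1 : d1.keys = st.1.keys ++ [(p.1, p.2)] :=
          PySem.Dict.keys_insert_of_not_contains _ _ hcont
        have hnd1 : d1.keys.Nodup := by
          rw [hkeys1]
          simp only [List.nodup_append, List.nodup_singleton]
          exact ⟨hnd, trivial, fun a ha b hb he => hpk (by subst he; rw [List.mem_singleton] at hb; subst hb; exact ha)⟩
        have hd1get : ∀ q, d1.get? q = if q = (p.1, p.2) then some l else st.1.get? q := by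
          intro q
          split
          · next hqp => rw [hqp]; exact PySem.Dict.get?_insert_self _ _ _
          · next hqp => exact PySem.Dict.get?_insert_of_ne _ _ hqp
        have hrelab := pvRelabel_fold (u := u) (l := l) d1.keys d1 d1 hnd1
          (fun k hk => by
            rw [← PySem.Dict.contains_eq_isSome_get?]
            exact (PySem.Dict.contains_iff_mem_keys _ _).2 hk)
          rfl
          (fun q => by
            split
            · rfl
            · next hq =>
              have : d1.contains q = false := by
                rcases h : d1.contains q with _ | _
                · rfl
                · exact absurd ((PySem.Dict.contains_iff_mem_keys _ _).1 h) hq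
              rw [PySem.Dict.contains_eq_isSome_get?] at this
              rw [Option.isSome_eq_false_iff, Option.isNone_iff_eq_none] at this
              rw [this]; rfl)
        have hstep : pvLabelStep g st p.1 p.2 =
            (d1.keys.foldl (fun d' k => if d'.getD k 0 == u then d'.insert k l else d') d1, st.2) := by
          have hbeq : (u == l) = false := by simp [hul]
          simp only [pvLabelStep, hg, hL, hU, hbeq, not_true, if_false, Bool.false_eq_true]
          rfl
        rw [hstep]
        obtain ⟨hkeys', hget'⟩ := hrelab
        -- neighbour facts
        have hNl : pvAdj g p (p.1, p.2 - 1) ∧ (p.1, p.2 - 1) ∈ P :=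
          (hNchar _).2 ⟨Or.inl rfl, by rw [hL]; rfl⟩
        have hNu : pvAdj g p (p.1 - 1, p.2) ∧ (p.1 - 1, p.2) ∈ P :=
          (hNchar _).2 ⟨Or.inr rfl, by rw [hU]; rfl⟩
        have hNonly : ∀ n, (pvAdj g p n ∧ n ∈ P) → st.1.get? n = some l ∨ st.1.get? n = some u := by
          intro n hn
          rcases (hNchar n).1 hn with ⟨rfl | rfl, -⟩
          · exact Or.inl hL
          · exact Or.inr hU
        have hlab_iff : ∀ a ta, st.1.get? a = some ta →
            ((∃ m, (pvAdj g p m ∧ m ∈ P) ∧ pvReachS g (· ∈ P) a m) ↔ (ta = l ∨ ta = u)) := by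
          intro a ta ha
          constructor
          · rintro ⟨m, hm, hr⟩
            rcases hNonly m hm with hml | hmu
            · exact Or.inl ((hF a m ta l ha hml).2 hr)
            · exact Or.inr ((hF a m ta u ha hmu).2 hr)
          · rintro (rfl | rfl)
            · exact ⟨(p.1, p.2 - 1), hNl, (hF a _ ta ta ha hL).1 rfl⟩
            · exact ⟨(p.1 - 1, p.2), hNu, (hF a _ ta ta ha hU).1 rfl⟩
        refine ⟨?_, ?_, ?_, ?_⟩
        · show (d1.keys.foldl (fun d' k => if d'.getD k 0 == u then d'.insert k l else d') d1).keys.Nodup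
          rw [hkeys']; exact hnd1
        · -- domain
          intro q
          rw [hget' q, hd1get q]
          split
          · next hqp =>
            subst hqp
            simp only [Option.map_some, Option.isSome_some, true_iff]
            exact ⟨hvp, List.mem_append_right _ (List.mem_singleton.2 rfl)⟩
          · next hqp =>
            rw [Option.isSome_map]
            rw [hK q]
            constructor
            · rintro ⟨h1, h2⟩; exact ⟨h1, List.mem_append_left _ h2⟩
            · rintro ⟨h1, h2⟩
              rcases List.mem_append.1 h2 with h | h
              · exact ⟨h1, h⟩
              · rw [List.mem_singleton] at h
                exact absurd h hqp
        · -- labels ↔ reachability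
          intro a b la lb ha hb
          rw [hget' a, hd1get a] at ha
          rw [hget' b, hd1get b] at hb
          rw [pvReachS_appendP]
          by_cases hap : a = (p.1, p.2) <;> by_cases hbp : b = (p.1, p.2)
          · rw [if_pos hap] at ha
            rw [if_pos hbp] at hb
            simp only [Option.map_some, Option.some.injEq] at ha hb
            subst hap; subst hbp
            rw [← ha, ← hb]
            exact iff_of_true rfl Relation.ReflTransGen.refl
          · rw [if_pos hap] at ha
            rw [if_neg hbp] at hb
            simp only [Option.map_some, Option.some.injEq] at ha
            rcases htb : st.1.get? b with _ | tb
            · rw [htb] at hb; exact absurd hb (by simp)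
            rw [htb] at hb
            simp only [Option.map_some, Option.some.injEq] at hb
            subst hap
            have hbp' : b ≠ p := fun h => hbp (h.trans rfl)
            rw [pvReachS_add_left_iff hbp']
            have hiff := hlab_iff b tb htb
            constructor
            · intro h
              have : tb = l ∨ tb = u := by
                rw [← ha, ← hb] at h
                rw [pvSubst_self_l hul] at h
                unfold pvSubst at h
                split at h <;> omega
              obtain ⟨m, hm, hr⟩ := hiff.2 this
              exact ⟨m, hm, pvReachS_symm hr⟩
            · rintro ⟨n, hn, hr⟩
              have : tb = l ∨ tb = u := hiff.1 ⟨n, hn, pvReachS_symm hr⟩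
              rw [← ha, ← hb, pvSubst_self_l hul]
              unfold pvSubst
              split <;> omega
          · rw [if_neg hap] at ha
            rw [if_pos hbp] at hb
            simp only [Option.map_some, Option.some.injEq] at hb
            rcases hta : st.1.get? a with _ | ta
            · rw [hta] at ha; exact absurd ha (by simp)
            rw [hta] at ha
            simp only [Option.map_some, Option.some.injEq] at ha
            subst hbp
            have hap' : a ≠ p := fun h => hap (h.trans rfl)
            have hiff := hlab_iff a ta hta
            constructor
            · intro h
              have : ta = l ∨ ta = u := by
                rw [← ha, ← hb] at h
                rw [pvSubst_self_l hul] at h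
                unfold pvSubst at h
                split at h <;> omega
              obtain ⟨m, hm, hr⟩ := hiff.2 this
              exact pvReachS_symm ((pvReachS_add_left_iff hap').2 ⟨m, hm, pvReachS_symm hr⟩)
            · intro h
              obtain ⟨n, hn, hr⟩ := (pvReachS_add_left_iff hap').1 (pvReachS_symm h)
              have : ta = l ∨ ta = u := hiff.1 ⟨n, hn, pvReachS_symm hr⟩
              rw [← ha, ← hb, pvSubst_self_l hul]
              unfold pvSubst
              split <;> omega
          · rw [if_neg hap] at ha
            rw [if_neg hbp] at hb
            rcases hta : st.1.get? a with _ | ta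
            · rw [hta] at ha; exact absurd ha (by simp)
            rcases htb : st.1.get? b with _ | tb
            · rw [htb] at hb; exact absurd hb (by simp)
            rw [hta] at ha; rw [htb] at hb
            simp only [Option.map_some, Option.some.injEq] at ha hb
            have hap' : a ≠ p := fun h => hap (h.trans rfl)
            have hbp' : b ≠ p := fun h => hbp (h.trans rfl)
            rw [pvReachS_add_iff hap' hbp']
            have hiffa := hlab_iff a ta hta
            have hiffb := hlab_iff b tb htb
            constructor
            · intro h
              rw [← ha, ← hb] at h
              rcases (pvSubst_eq_iff hul).1 h with he | ⟨hta', htb'⟩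
              · exact Or.inl ((hF a b ta tb hta htb).1 he)
              · obtain ⟨m, hm, hrm⟩ := hiffa.2 hta'
                obtain ⟨n, hn, hrn⟩ := hiffb.2 htb'
                exact Or.inr ⟨m, n, hm, hn, hrm, pvReachS_symm hrn⟩
            · rintro (h | ⟨m, n, hm, hn, hrm, hrn⟩)
              · rw [← ha, ← hb, (hF a b ta tb hta htb).2 h]
              · have hta' : ta = l ∨ ta = u := hiffa.1 ⟨m, hm, hrm⟩
                have htb' : tb = l ∨ tb = u := hiffb.1 ⟨n, hn, pvReachS_symm hrn⟩
                rw [← ha, ← hb]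
                exact (pvSubst_eq_iff hul).2 (Or.inr ⟨hta', htb'⟩)
        · -- bound
          intro a la ha
          rw [hget' a, hd1get a] at ha
          split at ha
          · simp only [Option.map_some, Option.some.injEq] at ha
            rw [← ha, pvSubst_self_l hul]
            exact hB _ l hL
          · rcases hta : st.1.get? a with _ | ta
            · rw [hta] at ha; exact absurd ha (by simp)
            rw [hta] at ha
            simp only [Option.map_some, Option.some.injEq] at ha
            rw [← ha]
            unfold pvSubst
            split
            · exact hB _ l hL
            · exact hB a ta hta

lemma pvBFold {g : List (List String)} :
    ∀ (suf P : List (Int × Int)) (st : PySem.Dict (Int × Int) Int × Int),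
      pvScan g = P ++ suf → pvBInv g P st →
      pvBInv g (pvScan g) (suf.foldl (fun st q => pvLabelStep g st q.1 q.2) st) := by
  intro suf
  induction suf with
  | nil => intro P st hs h; rw [List.foldl_nil, hs, List.append_nil]; exact h
  | cons p suf ih =>
    intro P st hs hinv
    rw [List.foldl_cons]
    exact ih (P ++ [p]) _ (by rw [hs, List.append_assoc]; rfl) (pvLabelStep_inv hs hinv)

-- ===== partitions and counting =====
def pvPartition (g : List (List String)) (L : List (List (Int × Int))) : Prop :=
  (∀ cl ∈ L, ∃ q, pvVil g q ∧ (∀ x, x ∈ cl ↔ pvReach g q x)) ∧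
  (∀ q, pvVil g q → ∃ cl ∈ L, (∀ x, x ∈ cl ↔ pvReach g q x)) ∧
  L.Pairwise (fun c1 c2 => ∀ x, x ∈ c1 → x ∉ c2)

lemma pvA_partition (g : List (List String)) :
    pvPartition g (((pvScan g).foldl (pvAStep g) (PySem.Set.empty, [])).2) := by
  have hinit : pvAInv g [] (PySem.Set.empty, []) := by
    refine ⟨List.nodup_nil, by simp [PySem.Set.empty], ?_, by simp, by simp, List.Pairwise.nil⟩
    intro x
    simp [PySem.Set.empty]
  have h := pvAFold (pvScan g) [] (PySem.Set.empty, []) (fun p hp => pvScan_mem.1 hp) hinit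
  rw [List.nil_append] at h
  obtain ⟨-, -, -, hcls, hcov, hpw⟩ := h
  refine ⟨?_, ?_, hpw⟩
  · intro cl hcl
    obtain ⟨q, -, hvq, hch⟩ := hcls cl hcl
    exact ⟨q, hvq, hch⟩
  · intro q hvq
    obtain ⟨cl, hcl, hch⟩ := hcov q (pvScan_mem.2 hvq.1) hvq
    exact ⟨cl, hcl, hch⟩

lemma pvB_invariant (g : List (List String)) :
    pvBInv g (pvScan g)
      ((pvScan g).foldl (fun st q => pvLabelStep g st q.1 q.2)
        ((PySem.Dict.empty : PySem.Dict (Int × Int) Int), (0 : Int))) := by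
  refine pvBFold (pvScan g) [] _ rfl ?_
  refine ⟨?_, ?_, ?_, ?_⟩
  · show (PySem.Dict.empty : PySem.Dict (Int × Int) Int).keys.Nodup
    simp [PySem.Dict.empty, PySem.Dict.keys]
  · intro q
    rw [PySem.Dict.get?_empty]
    simp
  · intro a b la lb ha
    rw [PySem.Dict.get?_empty] at ha
    exact absurd ha (by simp)
  · intro a la ha
    rw [PySem.Dict.get?_empty] at ha
    exact absurd ha (by simp)

-- B final dictionary: labels agree iff connected
lemma pvB_final_char (g : List (List String)) :
    let fin := (pvScan g).foldl (fun st q => pvLabelStep g st q.1 q.2)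
      ((PySem.Dict.empty : PySem.Dict (Int × Int) Int), (0 : Int))
    fin.1.keys.Nodup ∧
    (∀ q, (fin.1.get? q).isSome ↔ pvVil g q) ∧
    (∀ a b la lb, fin.1.get? a = some la → fin.1.get? b = some lb →
      (la = lb ↔ pvReach g a b)) := by
  intro fin
  obtain ⟨hnd, hK, hF, -⟩ := pvB_invariant g
  refine ⟨hnd, ?_, ?_⟩
  · intro q
    rw [hK q]
    constructor
    · exact fun h => h.1
    · intro h; exact ⟨h, pvScan_mem.2 h.1⟩
  · intro a b la lb ha hb
    rw [hF a b la lb ha hb]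
    rw [pvReachS_congr (fun y => by rw [pvScan_mem])]
    exact pvReachS_top

lemma pvB_partition (g : List (List String)) :
    pvPartition g
      (PySem.Dict.values
        (((pvScan g).foldl (fun st q => pvLabelStep g st q.1 q.2)
            ((PySem.Dict.empty : PySem.Dict (Int × Int) Int), (0 : Int))).1.items.foldl
          (fun gr it => PySem.Dict.modify gr it.2 [] (fun cs => cs ++ [it.1]))
          (PySem.Dict.empty : PySem.Dict Int (List (Int × Int))))) := by
  obtain ⟨hnd, hK, hF⟩ := pvB_final_char g
  set fin := (pvScan g).foldl (fun st q => pvLabelStep g st q.1 q.2)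
      ((PySem.Dict.empty : PySem.Dict (Int × Int) Int), (0 : Int)) with hfin
  set G := fin.1.items.foldl (fun gr it => PySem.Dict.modify gr it.2 [] (fun cs => cs ++ [it.1]))
      (PySem.Dict.empty : PySem.Dict Int (List (Int × Int))) with hG
  have hmemitems : ∀ x L, (x, L) ∈ fin.1.items ↔ fin.1.get? x = some L :=
    fun x L => (PySem.Dict.get?_eq_some_iff_mem_items fin.1 x L hnd).symm
  -- rewrite the groups fold into the canonical modify-by-fst shape
  have hGmap : G = (fin.1.items.map Prod.swap).foldl
      (fun d p => d.modify p.1 [] (fun cs => cs ++ [p.2]))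
      (PySem.Dict.empty : PySem.Dict Int (List (Int × Int))) := by
    rw [List.foldl_map]; rfl
  have hGkeys : G.keys = PySem.Set.ofList (fin.1.items.map (fun it => it.2)) := by
    rw [hGmap, PySem.Dict.keys_foldl_modify_key _ Prod.fst _ _ _]
    rw [show (PySem.Dict.empty : PySem.Dict Int (List (Int × Int))).keys = [] from rfl]
    rw [PySem.Set.update_nil_left]
    congr 1
    rw [List.map_map]
    rfl
  have hGnd : G.keys.Nodup := by
    rw [hGmap]
    exact PySem.Dict.nodup_keys_foldl_modify_key _ Prod.fst _ _ _ (by simp [PySem.Dict.empty, PySem.Dict.keys])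
  have hGget : ∀ L, G.getD L [] =
      ((fin.1.items.map Prod.swap).filter (fun p => p.1 == L)).map (fun p => p.2) := by
    intro L
    rw [hGmap]
    rw [PySem.Dict.getD_foldl_modify_append]
    simp [show (PySem.Dict.empty : PySem.Dict Int (List (Int × Int))).getD L [] = [] from rfl]
  have hGroup_mem : ∀ L x, x ∈ G.getD L [] ↔ fin.1.get? x = some L := by
    intro L x
    rw [hGget L]
    simp only [List.mem_map, List.mem_filter, List.mem_map]
    constructor
    · rintro ⟨p, ⟨⟨⟨a, b⟩, hab, rfl⟩, hbeq⟩, rfl⟩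
      simp only [Prod.swap_prod_mk] at hbeq ⊢
      rw [beq_iff_eq] at hbeq
      subst hbeq
      exact (hmemitems _ _).1 hab
    · intro h
      exact ⟨(L, x), ⟨⟨(x, L), (hmemitems _ _).2 h, rfl⟩, by simp⟩, rfl⟩
  have hvalues : G.values = G.keys.map (fun k => G.getD k []) :=
    PySem.Dict.values_eq_map_keys G hGnd []
  -- membership of a label in the keys
  have hkey_mem : ∀ L, L ∈ G.keys ↔ ∃ a, fin.1.get? a = some L := by
    intro L
    rw [hGkeys, PySem.Set.mem_ofList]
    simp only [List.mem_map]
    constructor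
    · rintro ⟨⟨a, b⟩, hab, rfl⟩
      exact ⟨a, (hmemitems _ _).1 hab⟩
    · rintro ⟨a, ha⟩
      exact ⟨(a, L), (hmemitems _ _).2 ha, rfl⟩
  have hchar : ∀ L a, fin.1.get? a = some L → ∀ x, x ∈ G.getD L [] ↔ pvReach g a x := by
    intro L a ha x
    rw [hGroup_mem L x]
    constructor
    · intro hx
      exact (hF a x L L ha hx).1 rfl
    · intro hr
      have hva : pvVil g a := by
        have := (hK a).1 (by rw [ha]; rfl)
        exact this
      have hvx : pvVil g x := pvReach_vil hva hr
      obtain ⟨lx, hlx⟩ := Option.isSome_iff_exists.1 ((hK x).2 hvx)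
      have : L = lx := (hF a x L lx ha hlx).2 hr
      rw [hlx, this]
  refine ⟨?_, ?_, ?_⟩
  · intro cl hcl
    rw [hvalues] at hcl
    obtain ⟨L, hL, rfl⟩ := List.mem_map.1 hcl
    obtain ⟨a, ha⟩ := (hkey_mem L).1 hL
    have hva : pvVil g a := (hK a).1 (by rw [ha]; rfl)
    exact ⟨a, hva, hchar L a ha⟩
  · intro q hvq
    obtain ⟨L, hL⟩ := Option.isSome_iff_exists.1 ((hK q).2 hvq)
    refine ⟨G.getD L [], ?_, hchar L q hL⟩
    rw [hvalues]
    exact List.mem_map.2 ⟨L, (hkey_mem L).2 ⟨q, hL⟩, rfl⟩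
  · rw [hvalues]
    rw [List.pairwise_map]
    refine (List.Pairwise.imp ?_ hGnd)
    intro L1 L2 hne x hx1 hx2
    rw [hGroup_mem] at hx1 hx2
    rw [hx1] at hx2
    exact hne (Option.some_injective _ hx2)

-- the 4-in-a-row check depends only on membership
lemma pvContains4_iff {cl : List (Int × Int)} :
    pvContains4 cl = true ↔ ∃ p, p ∈ cl ∧
      ((∀ i ∈ PySem.List.pyRange 0 4, (p.1, p.2 + i) ∈ cl) ∨
       (∀ i ∈ PySem.List.pyRange 0 4, (p.1 + i, p.2) ∈ cl)) := by
  unfold pvContains4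
  simp only [List.any_eq_true, List.all_eq_true, Bool.or_eq_true, PySem.Set.mem_ofList,
    PySem.Set.contains_iff]

lemma pvContains4_congr {cl cl' : List (Int × Int)} (h : ∀ x, x ∈ cl ↔ x ∈ cl') :
    pvContains4 cl = pvContains4 cl' := by
  rw [Bool.eq_iff_iff, pvContains4_iff, pvContains4_iff]
  constructor
  · rintro ⟨p, hp, hor⟩
    refine ⟨p, (h p).1 hp, ?_⟩
    rcases hor with h1 | h1
    · exact Or.inl (fun i hi => (h _).1 (h1 i hi))
    · exact Or.inr (fun i hi => (h _).1 (h1 i hi))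
  · rintro ⟨p, hp, hor⟩
    refine ⟨p, (h p).2 hp, ?_⟩
    rcases hor with h1 | h1
    · exact Or.inl (fun i hi => (h _).2 (h1 i hi))
    · exact Or.inr (fun i hi => (h _).2 (h1 i hi))

lemma pvPartition_nonempty {g : List (List String)} {L : List (List (Int × Int))}
    (h : pvPartition g L) : ∀ cl ∈ L, ∃ x, x ∈ cl := by
  intro cl hcl
  obtain ⟨q, -, hch⟩ := h.1 cl hcl
  exact ⟨q, (hch q).2 Relation.ReflTransGen.refl⟩

lemma pvPartition_map_nodup {g : List (List String)} {L : List (List (Int × Int))}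
    (h : pvPartition g L) : (L.map List.toFinset).Nodup := by
  rw [List.nodup_iff_pairwise_ne, List.pairwise_map]
  refine List.Pairwise.imp_of_mem ?_ h.2.2
  intro c1 c2 hc1 _ hdisj heq
  obtain ⟨x, hx⟩ := pvPartition_nonempty h c1 hc1
  have hx2 : x ∈ c2.toFinset := by rw [← heq]; exact List.mem_toFinset.2 hx
  exact hdisj x hx (List.mem_toFinset.1 hx2)

lemma pvHasRun_eq (cl : List (Int × Int)) : pvHasRun cl = pvContains4 cl := by
  rw [Bool.eq_iff_iff]
  unfold pvHasRun pvContains4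
  simp only [List.any_eq_true, List.all_eq_true, Bool.or_eq_true, PySem.Set.mem_ofList,
    PySem.Set.contains_iff]

lemma pvCountP_hasRun_eq (L : List (List (Int × Int))) :
    List.countP pvHasRun L = List.countP pvContains4 L :=
  List.countP_congr (fun cl _ => by rw [pvHasRun_eq cl])

lemma pvPartition_count {g : List (List String)} {L1 L2 : List (List (Int × Int))}
    (h1 : pvPartition g L1) (h2 : pvPartition g L2) :
    List.countP pvContains4 L1 = List.countP pvContains4 L2 := by
  have hmem : ∀ (L : List (List (Int × Int))), pvPartition g L → ∀ (S : Finset (Int × Int)),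
      S ∈ L.map List.toFinset ↔ ∃ q, pvVil g q ∧ ∀ x, x ∈ S ↔ pvReach g q x := by
    intro L hL S
    constructor
    · intro hS
      obtain ⟨cl, hcl, rfl⟩ := List.mem_map.1 hS
      obtain ⟨q, hvq, hch⟩ := hL.1 cl hcl
      exact ⟨q, hvq, fun x => by rw [List.mem_toFinset]; exact hch x⟩
    · rintro ⟨q, hvq, hch⟩
      obtain ⟨cl, hcl, hch'⟩ := hL.2.1 q hvq
      refine List.mem_map.2 ⟨cl, hcl, ?_⟩
      ext x
      rw [List.mem_toFinset, hch' x, ← hch x]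
  have hperm : (L1.map List.toFinset).Perm (L2.map List.toFinset) :=
    (List.perm_ext_iff_of_nodup (pvPartition_map_nodup h1) (pvPartition_map_nodup h2)).2
      (fun S => (hmem L1 h1 S).trans (hmem L2 h2 S).symm)
  have hcnt : ∀ (L : List (List (Int × Int))),
      List.countP pvContains4 L =
        List.countP (fun S => pvContains4 S.toList) (L.map List.toFinset) := by
    intro L
    rw [List.countP_map]
    refine List.countP_congr ?_
    intro cl _
    have : pvContains4 ((List.toFinset cl).toList) = pvContains4 cl :=
      pvContains4_congr (fun x => by rw [Finset.mem_toList, List.mem_toFinset])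
    simp only [Function.comp_apply, this]
  rw [hcnt L1, hcnt L2]
  exact hperm.countP_eq _

-- ===== assembling the two ports =====
lemma traylomonastery_eq (g : List (List String)) :
    traylomonastery g =
      (((((pvScan g).foldl (pvAStep g) (PySem.Set.empty, [])).2.countP pvContains4 : Nat) : Int)) * 7 := by
  simp only [traylomonastery]
  rw [pvFoldl_nested]
  rw [PySem.List.foldl_count_if]
  simp only [pvScan, Prod.mk.eta]
  norm_num

lemma traylomonastery_alt_eq (g : List (List String)) :
    traylomonastery_alt g =
      ((List.countP pvHasRun (PySem.Dict.values
        (((pvScan g).foldl (fun st q => pvLabelStep g st q.1 q.2)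
            ((PySem.Dict.empty : PySem.Dict (Int × Int) Int), (0 : Int))).1.items.foldl
          (fun gr it => PySem.Dict.modify gr it.2 [] (fun cs => cs ++ [it.1]))
          (PySem.Dict.empty : PySem.Dict Int (List (Int × Int))))) : Nat) : Int) * 7 := by
  simp only [traylomonastery_alt]
  rw [pvFoldl_nested]
  rw [PySem.List.foldl_count_if]
  simp only [pvScan]
  norm_num

-- ===== VERDICT (by name: the statement is the Claim_ definition above) =====
theorem traylomonastery_spec : Claim_equal_traylomonastery := by
  intro grid _ _
  show traylomonastery grid = traylomonastery_alt grid
  rw [traylomonastery_eq, traylomonastery_alt_eq]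
  rw [pvCountP_hasRun_eq]
  rw [pvPartition_count (pvA_partition grid) (pvB_partition grid)]
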